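-- pv_equiv track=rewrite | github.com/shradha001/python_is_easy | project_1/main.py | checkIfFourInBackwardDiagonal
-- ===== SOURCE A (Python) =====
-- def checkIfFourInBackwardDiagonal(column_matrix, player):
--     for i in range(0, len(column_matrix)):
--         for j in range(0, len(column_matrix[i])):
--             try:
--                 if column_matrix[i][j] == player and column_matrix[i + 1][j + 1] == player and column_matrix[i + 2][j + 2] == player and column_matrix[i + 3][j + 3] == player:
--                     return True
--             except IndexError:
--                 next
--     return False
-- ===== SOURCE B (Python) =====
-- def checkIfFourInBackwardDiagonal(column_matrix, player):
--     prev = []  # run lengths of backward-diagonals ending in the previous row, indexed by column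
--     for row in column_matrix:
--         cur = []
--         for j, v in enumerate(row):
--             if v == player:
--                 run = (prev[j - 1] if 0 <= j - 1 < len(prev) else 0) + 1
--                 if run >= 4:
--                     return True
--                 cur.append(run)
--             else:
--                 cur.append(0)
--         prev = cur
--     return False
-- ===== Notes on version B (the rewrite author's own statement) =====
-- stated objective: alternative
-- what changed: Replaced the per-cell 4-window probe with try/except by a single row-major pass that carries, per column, the run length of the matching backward diagonal ending in the previous row, returning True as soon as a run reaches 4.
import Mathlib
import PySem

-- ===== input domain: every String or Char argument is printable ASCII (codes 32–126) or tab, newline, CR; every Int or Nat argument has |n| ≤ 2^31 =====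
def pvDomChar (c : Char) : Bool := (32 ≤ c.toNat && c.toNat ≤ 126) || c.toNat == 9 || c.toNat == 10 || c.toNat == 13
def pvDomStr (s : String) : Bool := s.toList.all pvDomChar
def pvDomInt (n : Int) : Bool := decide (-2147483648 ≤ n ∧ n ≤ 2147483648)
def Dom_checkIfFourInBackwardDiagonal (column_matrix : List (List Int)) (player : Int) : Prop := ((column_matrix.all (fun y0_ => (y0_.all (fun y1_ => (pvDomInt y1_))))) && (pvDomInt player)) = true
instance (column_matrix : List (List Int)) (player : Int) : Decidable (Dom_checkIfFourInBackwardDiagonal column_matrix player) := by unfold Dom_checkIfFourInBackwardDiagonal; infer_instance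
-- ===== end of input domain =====

-- B replaces A's per-cell try/except 4-window probe by a single row-major pass that carries,
-- per column, the run length of the matching backward diagonal ending in the previous row
-- (alternative decomposition, same asymptotic cost).

-- ===== PORT A =====
-- pvCellA: column_matrix[i][j] as an Option (none = IndexError).
-- pvWindowA: the try-block; an IndexError and a false condition both fall through to the
-- next j, so a failed lookup contributes false exactly like a non-matching cell.
def pvCellA (m : List (List Int)) (i j : Int) : Option Int :=
  (PySem.List.pyGet? m i).bind (fun row => PySem.List.pyGet? row j)

def pvWindowA (m : List (List Int)) (p i j : Int) : Bool :=
  pvCellA m i j == some p && pvCellA m (i+1) (j+1) == some p &&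
  pvCellA m (i+2) (j+2) == some p && pvCellA m (i+3) (j+3) == some p

def checkIfFourInBackwardDiagonal (column_matrix : List (List Int)) (player : Int) : Bool :=
  (PySem.List.pyRange 0 column_matrix.length 1).any fun i =>
    (PySem.List.pyRange 0 (PySem.List.pyGetD column_matrix i []).length 1).any fun j =>
      pvWindowA column_matrix player i j

-- ===== PORT B =====
-- pvStepB: one step of Source B's inner loop (jv = (j, v) from enumerate(row));
-- pvRowStepB: the inner loop over one row, returning (cur, found);
-- pvLoopB: the outer loop over the rows (early return when found).
def pvStepB (p : Int) (prev : List Int) (st : List Int × Bool) (jv : Int × Int) : List Int × Bool :=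
  if st.2 then st
  else if jv.2 == p then
    let run := (if 0 ≤ jv.1 - 1 ∧ jv.1 - 1 < (prev.length : Int) then PySem.List.pyGetD prev (jv.1 - 1) 0 else 0) + 1
    if 4 ≤ run then (st.1, true) else (st.1 ++ [run], false)
  else (st.1 ++ [0], false)

def pvRowStepB (p : Int) (prev : List Int) (row : List Int) : List Int × Bool :=
  (PySem.List.enumerate row 0).foldl (pvStepB p prev) ([], false)

def pvLoopB (p : Int) (prev : List Int) : List (List Int) → Bool
  | [] => false
  | row :: rest =>
    let st := pvRowStepB p prev row
    if st.2 then true else pvLoopB p st.1 rest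

def checkIfFourInBackwardDiagonal_alt (column_matrix : List (List Int)) (player : Int) : Bool :=
  pvLoopB player [] column_matrix

-- ===== PRECONDITION & SPEC =====
def Spec_checkIfFourInBackwardDiagonal (column_matrix : List (List Int)) (player : Int) (out : Bool) : Prop := out = checkIfFourInBackwardDiagonal_alt column_matrix player
instance (column_matrix : List (List Int)) (player : Int) (out : Bool) : Decidable (Spec_checkIfFourInBackwardDiagonal column_matrix player out) := by unfold Spec_checkIfFourInBackwardDiagonal; infer_instance

-- ===== CLAIM (what is proved, stated in full; the proofs are below) =====
def Claim_equal_checkIfFourInBackwardDiagonal : Prop := ∀ (column_matrix : List (List Int)) (player : Int), Dom_checkIfFourInBackwardDiagonal column_matrix player → Spec_checkIfFourInBackwardDiagonal column_matrix player (checkIfFourInBackwardDiagonal column_matrix player)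

-- ===== LEMMAS AND PROOFS =====
-- Both programs are proved to return true exactly when some backward diagonal of four
-- matching cells exists, phrased via pvRun, the length of the matching diagonal ending
-- at a cell; pvW is A's 4-cell window condition.
def pvCell (m : List (List Int)) (p : Int) (i j : Nat) : Bool :=
  match m[i]? with
  | some row => row[j]? == some p
  | none => false
def pvRun (m : List (List Int)) (p : Int) : Nat → Nat → Int
  | 0, j => if pvCell m p 0 j then 1 else 0
  | i+1, 0 => if pvCell m p (i+1) 0 then 1 else 0
  | i+1, j+1 => if pvCell m p (i+1) (j+1) then pvRun m p i j + 1 else 0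

lemma pvRun_nonneg (m : List (List Int)) (p : Int) (i j : Nat) : 0 ≤ pvRun m p i j := by
  induction i generalizing j with
  | zero => simp [pvRun]; split <;> omega
  | succ i ih => cases j with
    | zero => simp [pvRun]; split <;> omega
    | succ j => simp only [pvRun]; split
                · have := ih j; omega
                · omega

lemma pvRun_pos_iff (m : List (List Int)) (p : Int) (i j : Nat) :
    0 < pvRun m p i j ↔ pvCell m p i j = true := by
  cases i with
  | zero => simp only [pvRun]; split <;> simp_all
  | succ i => cases j with
    | zero => simp only [pvRun]; split <;> simp_all
    | succ j => simp only [pvRun]; split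
                · have := pvRun_nonneg m p i j; simp_all
                · simp_all

lemma pvRun_le (m : List (List Int)) (p : Int) (i j : Nat) :
    pvRun m p i j ≤ (min i j : Nat) + 1 := by
  induction i generalizing j with
  | zero => simp only [pvRun]; split <;> simp
  | succ i ih => cases j with
    | zero => simp only [pvRun]; split <;> simp
    | succ j => simp only [pvRun]; split
                · have := ih j; push_cast; push_cast at this; omega
                · positivity
def pvW (m : List (List Int)) (p : Int) (a b : Nat) : Prop :=
  pvCell m p a b = true ∧ pvCell m p (a+1) (b+1) = true ∧
  pvCell m p (a+2) (b+2) = true ∧ pvCell m p (a+3) (b+3) = true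

lemma pvCell_lt {m : List (List Int)} {p : Int} {i j : Nat} (h : pvCell m p i j = true) :
    i < m.length ∧ j < (m.getD i []).length ∧ m[i]? = some (m.getD i []) := by
  unfold pvCell at h
  rcases hm : m[i]? with _ | row
  · simp [hm] at h
  · rw [hm] at h
    have hi : i < m.length := (List.getElem?_eq_some_iff.mp hm).1
    have hrow : m.getD i [] = row := by
      simp [List.getD_eq_getElem?_getD, hm]
    rcases hj : row[j]? with _ | v
    · simp [hj] at h
    · have : j < row.length := (List.getElem?_eq_some_iff.mp hj).1
      exact ⟨hi, by simp [List.getD_eq_getElem?_getD, hm, this], by simp [List.getD_eq_getElem?_getD, hm]⟩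

lemma pvRun_four_iff (m : List (List Int)) (p : Int) (a b : Nat) :
    4 ≤ pvRun m p (a+3) (b+3) ↔ pvW m p a b := by
  have e3 : pvRun m p (a+3) (b+3) = if pvCell m p (a+3) (b+3) then pvRun m p (a+2) (b+2) + 1 else 0 := rfl
  have e2 : pvRun m p (a+2) (b+2) = if pvCell m p (a+2) (b+2) then pvRun m p (a+1) (b+1) + 1 else 0 := rfl
  have e1 : pvRun m p (a+1) (b+1) = if pvCell m p (a+1) (b+1) then pvRun m p a b + 1 else 0 := rfl
  have hp := pvRun_pos_iff m p a b
  have h0 := pvRun_nonneg m p a b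
  rw [e3, e2, e1]
  unfold pvW
  split_ifs with c3 c2 c1 <;> simp_all
  rw [← hp]; omega

lemma pvExists_run_iff (m : List (List Int)) (p : Int) :
    (∃ i j : Nat, 4 ≤ pvRun m p i j) ↔ ∃ a b : Nat, pvW m p a b := by
  constructor
  · rintro ⟨i, j, h⟩
    have hle := pvRun_le m p i j
    push_cast at hle
    have hi3 : 3 ≤ i := by omega
    have hj3 : 3 ≤ j := by omega
    refine ⟨i - 3, j - 3, (pvRun_four_iff m p (i-3) (j-3)).mp ?_⟩
    rw [show i - 3 + 3 = i by omega, show j - 3 + 3 = j by omega]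
    exact h
  · rintro ⟨a, b, h⟩
    exact ⟨a+3, b+3, (pvRun_four_iff m p a b).mpr h⟩

lemma pvCellA_nat (m : List (List Int)) (p : Int) (a b : Nat) :
    (pvCellA m (a : Int) (b : Int) == some p) = pvCell m p a b := by
  unfold pvCellA pvCell
  rw [PySem.List.pyGet?_natCast]
  cases hm : m[a]? with
  | none => simp
  | some row => simp [PySem.List.pyGet?_natCast]

lemma pvCellA_nat' (m : List (List Int)) (p : Int) (a b k : Nat) :
    (pvCellA m ((a : Int) + (k : Int)) ((b : Int) + (k : Int)) == some p) = pvCell m p (a + k) (b + k) := by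
  have := pvCellA_nat m p (a + k) (b + k)
  push_cast at this
  exact this

lemma pvA_iff (m : List (List Int)) (p : Int) :
    checkIfFourInBackwardDiagonal m p = true ↔ ∃ a b : Nat, pvW m p a b := by
  unfold checkIfFourInBackwardDiagonal
  simp only [List.any_eq_true]
  constructor
  · rintro ⟨i, hi, j, hj, hw⟩
    rw [PySem.List.mem_pyRange_one] at hi hj
    lift i to ℕ using hi.1 with a
    lift j to ℕ using hj.1 with b
    refine ⟨a, b, ?_⟩
    unfold pvWindowA at hw
    simp only [Bool.and_eq_true] at hw
    obtain ⟨⟨⟨h0, h1⟩, h2⟩, h3⟩ := hw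
    rw [pvCellA_nat] at h0
    rw [show ((1:Int)) = ((1:Nat):Int) by norm_num, pvCellA_nat'] at h1
    rw [show ((2:Int)) = ((2:Nat):Int) by norm_num, pvCellA_nat'] at h2
    rw [show ((3:Int)) = ((3:Nat):Int) by norm_num, pvCellA_nat'] at h3
    exact ⟨h0, h1, h2, h3⟩
  · rintro ⟨a, b, hw⟩
    obtain ⟨c0, c1, c2, c3⟩ := hw
    obtain ⟨hi, hj, hrow⟩ := pvCell_lt c0
    refine ⟨(a : Int), ?_, (b : Int), ?_, ?_⟩
    · rw [PySem.List.mem_pyRange_one]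
      exact ⟨by positivity, by exact_mod_cast hi⟩
    · rw [PySem.List.mem_pyRange_one]
      refine ⟨by positivity, ?_⟩
      rw [PySem.List.pyGetD_natCast]
      exact_mod_cast hj
    · unfold pvWindowA
      simp only [Bool.and_eq_true]
      refine ⟨⟨⟨?_, ?_⟩, ?_⟩, ?_⟩
      · rw [pvCellA_nat]; exact c0
      · rw [show ((1:Int)) = ((1:Nat):Int) by norm_num, pvCellA_nat']; exact c1
      · rw [show ((2:Int)) = ((2:Nat):Int) by norm_num, pvCellA_nat']; exact c2
      · rw [show ((3:Int)) = ((3:Nat):Int) by norm_num, pvCellA_nat']; exact c3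

def pvAbove (m : List (List Int)) (p : Int) : Nat → Nat → Int
  | 0, _ => 0
  | k+1, t => pvRun m p k t

def pvRowrun (R : Nat → Int) (p : Int) (row : List Int) (t : Nat) : Int :=
  if row[t]? == some p then (if t = 0 then 0 else R (t-1)) + 1 else 0

lemma pvRowrun_zero_of_le (R : Nat → Int) (p : Int) (row : List Int) (u : Nat)
    (h : row.length ≤ u) : pvRowrun R p row u = 0 := by
  simp [pvRowrun, List.getElem?_eq_none h]

lemma pvRun_row (m : List (List Int)) (p : Int) (k : Nat) (row : List Int)
    (hk : m[k]? = some row) (t : Nat) :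
    pvRun m p k t = pvRowrun (pvAbove m p k) p row t := by
  cases k with
  | zero => cases t with
    | zero => simp [pvRun, pvRowrun, pvCell, hk]
    | succ t => simp [pvRun, pvRowrun, pvAbove, pvCell, hk]
  | succ k => cases t with
    | zero => simp [pvRun, pvRowrun, pvCell, hk]
    | succ t => simp [pvRun, pvRowrun, pvAbove, pvCell, hk]

lemma pvStepB_true (p : Int) (prev : List Int) (c : List Int) (jv : Int × Int) :
    pvStepB p prev (c, true) jv = (c, true) := by
  simp [pvStepB]

lemma pvFoldl_stepB_true (p : Int) (prev : List Int) (l : List (Int × Int)) (c : List Int) :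
    l.foldl (pvStepB p prev) (c, true) = (c, true) := by
  induction l with
  | nil => rfl
  | cons x l ih => simp [List.foldl_cons, pvStepB_true, ih]

lemma pvGetD_append_single (cur : List Int) (r : Int) (u : Nat) :
    (cur ++ [r]).getD u 0 = if u < cur.length then cur.getD u 0 else if u = cur.length then r else 0 := by
  rcases lt_trichotomy u cur.length with h | h | h
  · simp [List.getD_eq_getElem?_getD, List.getElem?_append_left h, h]
  · subst h
    simp [List.getD_eq_getElem?_getD]
  · rw [List.getD_eq_getElem?_getD, List.getElem?_append_right (by omega : cur.length ≤ u)]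
    have : u - cur.length ≥ 1 := by omega
    rw [List.getElem?_eq_none (by simp; omega)]
    simp; omega

lemma pvLookup_prev (prev : List Int) (R : Nat → Int) (hR : ∀ t, prev.getD t 0 = R t) (j : Nat) :
    (if 0 ≤ (j : Int) - 1 ∧ (j : Int) - 1 < (prev.length : Int)
       then PySem.List.pyGetD prev ((j : Int) - 1) 0 else 0)
      = if j = 0 then 0 else R (j-1) := by
  cases j with
  | zero => norm_num
  | succ j' =>
    have hc : ((j'+1 : Nat) : Int) - 1 = ((j' : Nat) : Int) := by push_cast; ring
    rw [hc]
    by_cases hlt : j' < prev.length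
    · rw [if_pos ⟨by positivity, by exact_mod_cast hlt⟩, PySem.List.pyGetD_natCast, hR j']
      simp
    · rw [if_neg (by intro hand; exact absurd (by exact_mod_cast hand.2) hlt)]
      have h2 : R j' = 0 := by
        rw [← hR j']; exact List.getD_eq_default _ _ (Nat.le_of_not_lt hlt)
      simp [h2]

lemma pvInnerB (p : Int) (prev : List Int) (R : Nat → Int) (hR : ∀ t, prev.getD t 0 = R t)
    (row : List Int) :
    ∀ (xs : List Int) (t : Nat) (cur : List Int),
      xs = row.drop t → cur.length = t →
      (∀ u, cur.getD u 0 = if u < t then pvRowrun R p row u else 0) →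
      (((PySem.List.enumerate xs (t : Int)).foldl (pvStepB p prev) (cur, false)).2 = true
          ↔ ∃ u, t ≤ u ∧ 4 ≤ pvRowrun R p row u) ∧
      (((PySem.List.enumerate xs (t : Int)).foldl (pvStepB p prev) (cur, false)).2 = false →
          ∀ u, (((PySem.List.enumerate xs (t : Int)).foldl (pvStepB p prev) (cur, false)).1).getD u 0
            = pvRowrun R p row u) := by
  intro xs
  induction xs with
  | nil =>
    intro t cur hxs hlen hcur
    have hrl : row.length ≤ t := by
      rw [← List.drop_eq_nil_iff]; exact hxs.symm
    simp only [PySem.List.enumerate_nil, List.foldl_nil]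
    constructor
    · simp only [Bool.false_eq_true, false_iff]
      rintro ⟨u, hu, h4⟩
      rw [pvRowrun_zero_of_le R p row u (by omega)] at h4
      omega
    · intro _ u
      rw [hcur u]
      split_ifs with h
      · rfl
      · exact (pvRowrun_zero_of_le R p row u (by omega)).symm
  | cons x xs' ih =>
    intro t cur hxs hlen hcur
    have h0 : (row.drop t)[0]? = some x := by rw [← hxs]; rfl
    have hx : row[t]? = some x := by
      rw [List.getElem?_drop] at h0; simpa using h0
    have hxs' : xs' = row.drop (t+1) := by
      rw [← List.tail_drop, ← hxs]
      rfl
    have hrr : pvRowrun R p row t = if x == p then (if t = 0 then 0 else R (t-1)) + 1 else 0 := by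
      simp [pvRowrun, hx]
    have hstep : pvStepB p prev (cur, false) ((t : Int), x)
        = if 4 ≤ pvRowrun R p row t then (cur, true) else (cur ++ [pvRowrun R p row t], false) := by
      simp only [pvStepB, Bool.false_eq_true, if_false]
      rw [pvLookup_prev prev R hR t]
      by_cases hxp : (x == p) = true
      · simp only [hrr, hxp, if_true]
      · simp only [hrr, hxp, Bool.false_eq_true, if_false]
        norm_num
    have hcast : (t : Int) + 1 = ((t+1 : Nat) : Int) := by push_cast; ring
    rw [PySem.List.enumerate_cons, List.foldl_cons, hstep, hcast]
    by_cases h4 : 4 ≤ pvRowrun R p row t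
    · rw [if_pos h4, pvFoldl_stepB_true]
      exact ⟨⟨fun _ => ⟨t, le_refl t, h4⟩, fun _ => rfl⟩, fun hf => absurd hf (by simp)⟩
    · rw [if_neg h4]
      have hlen' : (cur ++ [pvRowrun R p row t]).length = t + 1 := by simp [hlen]
      have hcur' : ∀ u, (cur ++ [pvRowrun R p row t]).getD u 0
          = if u < t + 1 then pvRowrun R p row u else 0 := by
        intro u
        rw [pvGetD_append_single, hlen, hcur u]
        by_cases h1 : u < t
        · simp [h1, show u < t+1 by omega]
        · by_cases h2 : u = t
          · subst h2; simp [show u < u+1 by omega]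
          · simp [h1, h2, show ¬ (u < t+1) by omega]
      obtain ⟨i1, i2⟩ := ih (t+1) (cur ++ [pvRowrun R p row t]) hxs' hlen' hcur'
      constructor
      · rw [i1]
        constructor
        · rintro ⟨u, hu, hu4⟩; exact ⟨u, by omega, hu4⟩
        · rintro ⟨u, hu, hu4⟩
          refine ⟨u, ?_, hu4⟩
          rcases Nat.eq_or_lt_of_le hu with h | h
          · subst h; omega
          · omega
      · exact i2

lemma pvLoopB_iff (m : List (List Int)) (p : Int) :
    ∀ (rest : List (List Int)) (k : Nat) (prev : List Int),
      rest = m.drop k → (∀ t, prev.getD t 0 = pvAbove m p k t) →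
      (pvLoopB p prev rest = true ↔ ∃ i j : Nat, k ≤ i ∧ 4 ≤ pvRun m p i j) := by
  intro rest
  induction rest with
  | nil =>
    intro k prev hrest hprev
    have hlen : m.length ≤ k := by rw [← List.drop_eq_nil_iff]; exact hrest.symm
    simp only [pvLoopB, Bool.false_eq_true, false_iff]
    rintro ⟨i, j, hki, h4⟩
    have hc : pvCell m p i j = true := (pvRun_pos_iff m p i j).mp (by omega)
    have := (pvCell_lt hc).1
    omega
  | cons row rest' ih =>
    intro k prev hrest hprev
    have h0 : (m.drop k)[0]? = some row := by rw [← hrest]; rfl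
    have hk : m[k]? = some row := by
      rw [List.getElem?_drop] at h0; simpa using h0
    have hrest' : rest' = m.drop (k+1) := by
      rw [← List.tail_drop, ← hrest]
      rfl
    have hinner := pvInnerB p prev (pvAbove m p k) hprev row row 0 []
      (rfl : row = List.drop 0 row) rfl (by intro u; simp)
    simp only [Nat.cast_zero] at hinner
    obtain ⟨i1, i2⟩ := hinner
    simp only [← pvRun_row m p k row hk] at i1 i2
    show (if (pvRowStepB p prev row).2 then true else pvLoopB p (pvRowStepB p prev row).1 rest') = true
      ↔ _
    cases hst : (pvRowStepB p prev row).2 with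
    | true =>
      simp only [if_true]
      unfold pvRowStepB at hst
      obtain ⟨u, -, hu4⟩ := i1.mp hst
      simp only [true_iff]
      exact ⟨k, u, le_refl k, hu4⟩
    | false =>
      simp only [Bool.false_eq_true, if_false]
      unfold pvRowStepB at hst
      have hnone : ∀ j : Nat, ¬ (4 ≤ pvRun m p k j) := by
        intro j h4
        have : (List.foldl (pvStepB p prev) ([], false) (PySem.List.enumerate row 0)).2 = true :=
          i1.mpr ⟨j, Nat.zero_le j, h4⟩
        rw [hst] at this; exact absurd this (by simp)
      have hprev' : ∀ t, (pvRowStepB p prev row).1.getD t 0 = pvAbove m p (k+1) t := by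
        intro t
        show _ = pvRun m p k t
        unfold pvRowStepB
        exact i2 hst t
      rw [ih (k+1) (pvRowStepB p prev row).1 hrest' hprev']
      constructor
      · rintro ⟨i, j, hki, h4⟩; exact ⟨i, j, by omega, h4⟩
      · rintro ⟨i, j, hki, h4⟩
        refine ⟨i, j, ?_, h4⟩
        rcases Nat.eq_or_lt_of_le hki with h | h
        · subst h; exact absurd h4 (hnone j)
        · omega

lemma pvB_iff (m : List (List Int)) (p : Int) :
    checkIfFourInBackwardDiagonal_alt m p = true ↔ ∃ i j : Nat, 4 ≤ pvRun m p i j := by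
  unfold checkIfFourInBackwardDiagonal_alt
  rw [pvLoopB_iff m p m 0 [] (rfl : m = List.drop 0 m) (by intro t; simp [pvAbove])]
  constructor
  · rintro ⟨i, j, -, h4⟩; exact ⟨i, j, h4⟩
  · rintro ⟨i, j, h4⟩; exact ⟨i, j, Nat.zero_le i, h4⟩

-- ===== VERDICT (by name: the statement is the Claim_ definition above) =====
theorem checkIfFourInBackwardDiagonal_spec : Claim_equal_checkIfFourInBackwardDiagonal := by
  intro m p _
  unfold Spec_checkIfFourInBackwardDiagonal
  rw [Bool.eq_iff_iff, pvA_iff, pvB_iff, pvExists_run_iff]
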